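-- pv_equiv track=rewrite | github.com/amazon7737/algorithm-test | 2023_1_old/programmers/고득점/힙/더맵게.py | solution
-- ===== SOURCE A (Python) =====
-- def solution(scoville, K):
--     arr = []
--     count = 0
--     arr = scoville
--
--
--     while min(arr) < K:
--         try:
--             arr.sort();a = arr[0] + (arr[1]*2);arr.pop(0);arr[0]=a;count+=1
--         except IndexError: # 까먹고 -1 return 할 경우를 뺌.
--             return -1
--
--     return count
-- ===== SOURCE B (Python) =====
-- # B: sort once, then maintain the sorted order by inserting each combined value
-- # in place (linear scan), instead of re-sorting the whole list every iteration.
-- # Unlike A, B does not mutate the input list (return value is what is compared).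
-- def _insert_sorted(xs, v):
--     out = []
--     i = 0
--     n = len(xs)
--     while i < n and xs[i] < v:
--         out.append(xs[i])
--         i += 1
--     out.append(v)
--     out.extend(xs[i:])
--     return out
--
-- def solution(scoville, K):
--     arr = sorted(scoville)
--     count = 0
--     while arr[0] < K:
--         if len(arr) == 1:
--             return -1
--         v = arr[0] + 2 * arr[1]
--         arr = _insert_sorted(arr[2:], v)
--         count += 1
--     return count
-- ===== Notes on version B (the rewrite author's own statement) =====
-- stated objective: alternative
-- what changed: A re-sorts the whole list and recomputes min() on every loop iteration; B sorts once up front and keeps the list sorted by inserting each combined value at its position, so the head is always the minimum.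
import Mathlib
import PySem

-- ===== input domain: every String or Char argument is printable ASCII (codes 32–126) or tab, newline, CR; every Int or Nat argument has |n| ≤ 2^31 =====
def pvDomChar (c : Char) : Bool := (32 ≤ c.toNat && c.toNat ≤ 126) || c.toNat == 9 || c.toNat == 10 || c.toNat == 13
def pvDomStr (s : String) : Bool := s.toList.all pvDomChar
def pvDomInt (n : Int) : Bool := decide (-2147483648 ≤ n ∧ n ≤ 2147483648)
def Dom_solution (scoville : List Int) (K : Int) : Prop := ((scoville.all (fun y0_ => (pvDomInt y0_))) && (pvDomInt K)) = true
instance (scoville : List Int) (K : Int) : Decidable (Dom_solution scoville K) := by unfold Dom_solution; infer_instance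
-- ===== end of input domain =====

-- B sorts once and maintains sortedness by ordered insertion instead of re-sorting
-- and recomputing min() every iteration (A also mutates its argument; B does not —
-- the equivalence proved here is about the return value).


-- ===== PORT A =====
-- A's while loop: min(arr) < K → sort, combine the two smallest (IndexError on a
-- 1-element list → return -1), repeat. Branch `none` (empty list) is Python's
-- ValueError on min([]), excluded by Pre_solution.
def loopA (arr : List Int) (K : Int) (count : Int) : Int :=
  match PySem.List.min? arr (fun x => x) with
  | none => 0
  | some m =>
    if m < K then
      match h : PySem.List.sorted arr (fun x => x) false with
      | [] => 0
      | [_] => -1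
      | x :: y :: rest => loopA ((x + y * 2) :: rest) K (count + 1)
    else count
termination_by arr.length
decreasing_by
  have hl := PySem.List.length_sorted arr (fun x => x) false
  rw [h] at hl
  simp at hl ⊢
  omega

def solution (scoville : List Int) (K : Int) : Int := loopA scoville K 0

-- ===== PORT B =====
-- _insert_sorted: scan past elements < v, then v, then the remainder.
def insertSorted (v : Int) : List Int → List Int
  | [] => [v]
  | x :: xs => if x < v then x :: insertSorted v xs else v :: x :: xs

-- B's while loop over an already-sorted list. Branch `[]` is Python's IndexError
-- on arr[0], excluded by Pre_solution.
def loopB (arr : List Int) (K : Int) (count : Int) : Int :=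
  match arr with
  | [] => 0
  | [x] => if x < K then -1 else count
  | x :: y :: rest =>
    if x < K then loopB (insertSorted (x + 2 * y) rest) K (count + 1) else count
termination_by arr.length
decreasing_by
  have : (insertSorted (x + 2 * y) rest).length = rest.length + 1 := by
    induction rest with
    | nil => simp [insertSorted]
    | cons a t ih => simp [insertSorted]; split <;> simp [ih]
  simp [this]

def solution_alt (scoville : List Int) (K : Int) : Int :=
  loopB (PySem.List.sorted scoville (fun x => x) false) K 0

-- ===== PRECONDITION & SPEC =====
-- Pre_ excludes only the empty list, on which A raises ValueError (min of empty sequence).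
def Pre_solution (scoville : List Int) (K : Int) : Prop := scoville ≠ []
instance (scoville : List Int) (K : Int) : Decidable (Pre_solution scoville K) := by unfold Pre_solution; infer_instance
def pvWitness_solution : List Int × Int := ([1, 2, 3, 9, 10, 12], 7)

def Spec_solution (scoville : List Int) (K : Int) (out : Int) : Prop := out = solution_alt scoville K
instance (scoville : List Int) (K : Int) (out : Int) : Decidable (Spec_solution scoville K out) := by unfold Spec_solution; infer_instance

-- ===== CLAIM (what is proved, stated in full; the proofs are below) =====
def Claim_equal_solution : Prop := ∀ (scoville : List Int) (K : Int), Dom_solution scoville K → Pre_solution scoville K → Spec_solution scoville K (solution scoville K)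

-- ===== LEMMAS AND PROOFS =====

theorem insertSorted_perm (v : Int) (xs : List Int) : (insertSorted v xs).Perm (v :: xs) := by
  induction xs with
  | nil => simp [insertSorted]
  | cons x t ih =>
    simp only [insertSorted]
    split
    · exact ((ih.cons x).trans (List.Perm.swap v x t))
    · exact List.Perm.refl _

theorem insertSorted_pairwise (v : Int) (xs : List Int)
    (h : xs.Pairwise (· ≤ ·)) : (insertSorted v xs).Pairwise (· ≤ ·) := by
  induction xs with
  | nil => simp [insertSorted]
  | cons x t ih =>
    rw [List.pairwise_cons] at h
    simp only [insertSorted]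
    split
    · rename_i hx
      rw [List.pairwise_cons]
      refine ⟨fun b hb => ?_, ih h.2⟩
      have hb' : b ∈ v :: t := (insertSorted_perm v t).mem_iff.1 hb
      rcases List.mem_cons.mp hb' with rfl | hb'
      · omega
      · exact h.1 b hb'
    · rename_i hx
      rw [List.pairwise_cons, List.pairwise_cons]
      refine ⟨fun b hb => ?_, h.1, h.2⟩
      rcases List.mem_cons.mp hb with rfl | hb
      · omega
      · exact le_trans (by omega) (h.1 b hb)

-- sorted (v :: rest) of an already-sorted rest is exactly ordered insertion of v.
theorem sorted_cons_eq_insertSorted (v : Int) (rest : List Int)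
    (h : rest.Pairwise (· ≤ ·)) :
    PySem.List.sorted (v :: rest) (fun x => x) false = insertSorted v rest := by
  exact PySem.List.sorted_id_eq_of_perm_of_pairwise (v :: rest) (insertSorted v rest)
    (insertSorted_perm v rest) (insertSorted_pairwise v rest h)

-- min(xs) is the head of sorted(xs).
theorem min?_eq_head_sorted (xs : List Int) (m : Int) (t : List Int)
    (h : PySem.List.sorted xs (fun x => x) false = m :: t) :
    PySem.List.min? xs (fun x => x) = some m := by
  have hne : xs ≠ [] := by
    intro hx
    have h0 := (PySem.List.sorted_eq_nil_iff xs (fun x => x) false).mpr hx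
    rw [h] at h0
    simp at h0
  obtain ⟨m', hm'⟩ : ∃ m', PySem.List.min? xs (fun x => x) = some m' := by
    cases hmin : PySem.List.min? xs (fun x => x) with
    | none => exact absurd ((PySem.List.min?_eq_none_iff xs (fun x => x)).mp hmin) hne
    | some a => exact ⟨a, rfl⟩
  have hm'mem : m' ∈ xs := PySem.List.min?_mem hm'
  have hmmem : m ∈ xs := by
    have : m ∈ PySem.List.sorted xs (fun x => x) false := by rw [h]; simp
    rwa [PySem.List.mem_sorted] at this
  have h1 : m ≤ m' := PySem.List.key_head_sorted_le xs (fun x => x) h m' hm'mem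
  have h2 : m' ≤ m := PySem.List.min?_isMin hm' m hmmem
  rw [hm']
  exact congrArg some (le_antisymm h2 h1)

-- Main invariant: on a nonempty list, A's re-sorting loop equals B's loop run on
-- the sorted list.
theorem loopA_eq_loopB (n : Nat) : ∀ (arr : List Int) (K count : Int),
    arr.length ≤ n → arr ≠ [] →
    loopA arr K count = loopB (PySem.List.sorted arr (fun x => x) false) K count := by
  induction n with
  | zero => intro arr K count hlen hne; cases arr <;> simp_all
  | succ n ih =>
    intro arr K count hlen hne
    have hsne : PySem.List.sorted arr (fun x => x) false ≠ [] := by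
      rw [Ne, PySem.List.sorted_eq_nil_iff]; exact hne
    obtain ⟨m, t, hs⟩ : ∃ m t, PySem.List.sorted arr (fun x => x) false = m :: t := by
      cases h : PySem.List.sorted arr (fun x => x) false with
      | nil => exact absurd h hsne
      | cons a b => exact ⟨a, b, rfl⟩
    have hmin := min?_eq_head_sorted arr m t hs
    have hlensort := PySem.List.length_sorted arr (fun x => x) false
    rw [hs] at hlensort
    have hpw : (m :: t).Pairwise (· ≤ ·) := by
      have := PySem.List.sorted_pairwise arr (fun x => x)
      rwa [hs] at this
    rw [loopA, hmin, hs]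
    cases t with
    | nil =>
      by_cases hK : m < K <;> simp [hK, loopB]
    | cons y rest =>
      by_cases hK : m < K
      · simp only [hK, if_pos]
        rw [loopB, if_pos hK]
        have hrest : rest.Pairwise (· ≤ ·) := (List.pairwise_cons.mp (List.pairwise_cons.mp hpw).2).2
        have hrw : insertSorted (m + 2 * y) rest = PySem.List.sorted ((m + y * 2) :: rest) (fun x => x) false := by
          rw [sorted_cons_eq_insertSorted (m + y * 2) rest hrest]
          ring_nf
        rw [hrw]
        apply ih
        · simp at hlensort ⊢; omega
        · simp
      · simp [loopB, hK]

-- ===== VERDICT (by name: the statement is the Claim_ definition above) =====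
theorem solution_spec : Claim_equal_solution := by
  intro scoville K _ hpre
  unfold Spec_solution solution solution_alt
  exact loopA_eq_loopB scoville.length scoville K 0 le_rfl hpre
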